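-- pv_equiv track=rewrite | github.com/agnel18/anki-fluent-forever-language-card-generator | languages/malayalam/domain/ml_validator.py | _has_valid_malayalam_patterns
-- ===== SOURCE A (Python) =====
-- from typing import Dict, Any, List
--
-- def _has_valid_malayalam_patterns(word_explanations: List[List[Any]]) -> bool:
--     """Check if result has valid Malayalam grammar patterns."""
--     roles = [item[1] for item in word_explanations if len(item) > 1]
--
--     # Malayalam sentences typically end with a verb (SOV)
--     has_verb = any(
--         role in ['verb', 'auxiliary_verb', 'copula', 'verbal_participle',
--                  'causative_verb', 'passive_verb']
--         for role in roles
--     )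
--
--     # Must have at least one content word
--     has_content = any(
--         role in ['noun', 'verb', 'adjective', 'pronoun']
--         for role in roles
--     )
--
--     return has_content and has_verb
-- ===== SOURCE B (Python) =====
-- from typing import Any, List
--
-- _VERB_ROLES = frozenset(['verb', 'auxiliary_verb', 'copula', 'verbal_participle',
--                          'causative_verb', 'passive_verb'])
-- _CONTENT_ROLES = frozenset(['noun', 'verb', 'adjective', 'pronoun'])
--
-- def _has_valid_malayalam_patterns(word_explanations: List[List[Any]]) -> bool:
--     """Single stateful pass over word_explanations with early exit."""
--     has_verb = False
--     has_content = False
--     for item in word_explanations: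
--         if len(item) > 1:
--             role = item[1]
--             if role in _VERB_ROLES:
--                 has_verb = True
--             if role in _CONTENT_ROLES:
--                 has_content = True
--             if has_content and has_verb:
--                 return True
--     return has_content and has_verb
-- ===== Notes on version B (the rewrite author's own statement) =====
-- stated objective: alternative
-- what changed: Replaces the intermediate roles list plus two separate any() scans with one stateful pass that maintains both flags and returns early once a content word and a verb were both seen.
import Mathlib
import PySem

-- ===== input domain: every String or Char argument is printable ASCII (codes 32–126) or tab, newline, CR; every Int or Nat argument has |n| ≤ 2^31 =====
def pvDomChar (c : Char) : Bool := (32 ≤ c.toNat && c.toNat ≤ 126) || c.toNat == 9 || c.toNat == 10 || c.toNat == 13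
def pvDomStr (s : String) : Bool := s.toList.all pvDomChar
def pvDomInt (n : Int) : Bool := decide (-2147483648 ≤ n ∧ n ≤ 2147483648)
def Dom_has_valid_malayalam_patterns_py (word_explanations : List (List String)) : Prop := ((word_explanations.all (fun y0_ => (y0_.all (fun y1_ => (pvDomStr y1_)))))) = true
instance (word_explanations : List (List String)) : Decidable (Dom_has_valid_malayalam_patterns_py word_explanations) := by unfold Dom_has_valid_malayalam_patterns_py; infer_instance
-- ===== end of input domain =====

-- B replaces A's roles list plus two separate any() scans by one stateful pass with early exit; objective: alternative decomposition, same cost.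

-- ===== PORT A =====
def pvVerbRoles : List String := ["verb", "auxiliary_verb", "copula", "verbal_participle", "causative_verb", "passive_verb"]
def pvContentRoles : List String := ["noun", "verb", "adjective", "pronoun"]

def has_valid_malayalam_patterns_py (word_explanations : List (List String)) : Bool :=
  let roles := (word_explanations.filter (fun item => decide (1 < item.length))).map
      (fun item => item.getD 1 "")   -- item[1]; in range because len(item) > 1
  let has_verb := roles.any (fun role => pvVerbRoles.contains role)
  let has_content := roles.any (fun role => pvContentRoles.contains role)
  has_content && has_verb

-- ===== PORT B =====
def pvAltGo : List (List String) → Bool → Bool → Bool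
  | [], has_content, has_verb => has_content && has_verb
  | item :: rest, has_content, has_verb =>
    if 1 < item.length then
      let role := item.getD 1 ""
      let has_verb' := if pvVerbRoles.contains role then true else has_verb
      let has_content' := if pvContentRoles.contains role then true else has_content
      if has_content' && has_verb' then true else pvAltGo rest has_content' has_verb'
    else pvAltGo rest has_content has_verb

def has_valid_malayalam_patterns_py_alt (word_explanations : List (List String)) : Bool :=
  pvAltGo word_explanations false false

-- ===== PRECONDITION & SPEC =====
def Spec_has_valid_malayalam_patterns_py (word_explanations : List (List String)) (out : Bool) : Prop := out = has_valid_malayalam_patterns_py_alt word_explanations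
instance (word_explanations : List (List String)) (out : Bool) : Decidable (Spec_has_valid_malayalam_patterns_py word_explanations out) := by unfold Spec_has_valid_malayalam_patterns_py; infer_instance

-- ===== CLAIM (what is proved, stated in full; the proofs are below) =====
def Claim_equal_has_valid_malayalam_patterns_py : Prop := ∀ (word_explanations : List (List String)), Dom_has_valid_malayalam_patterns_py word_explanations → Spec_has_valid_malayalam_patterns_py word_explanations (has_valid_malayalam_patterns_py word_explanations)

-- ===== LEMMAS AND PROOFS =====
lemma pvAltGo_eq (xs : List (List String)) : ∀ (hc hv : Bool),
    pvAltGo xs hc hv =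
      ((hc || xs.any (fun item => decide (1 < item.length) && pvContentRoles.contains (item.getD 1 ""))) &&
       (hv || xs.any (fun item => decide (1 < item.length) && pvVerbRoles.contains (item.getD 1 "")))) := by
  induction xs with
  | nil => intro hc hv; simp [pvAltGo]
  | cons item rest ih =>
    intro hc hv
    by_cases hlen : 1 < item.length
    · simp only [pvAltGo, if_pos hlen]
      by_cases hcv : ((if pvContentRoles.contains (item.getD 1 "") then true else hc) &&
                      (if pvVerbRoles.contains (item.getD 1 "") then true else hv)) = true
      · rw [if_pos hcv]
        simp only [Bool.and_eq_true] at hcv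
        obtain ⟨h1, h2⟩ := hcv
        simp only [List.any_cons, hlen, decide_true, Bool.true_and]
        split_ifs at h1 h2 with c1 c2 <;>
          simp_all
      · rw [if_neg hcv, ih]
        simp only [List.any_cons, hlen, decide_true, Bool.true_and]
        split_ifs <;> simp_all
    · simp [pvAltGo, hlen, ih]

lemma portA_eq (xs : List (List String)) :
    has_valid_malayalam_patterns_py xs =
      (xs.any (fun item => decide (1 < item.length) && pvContentRoles.contains (item.getD 1 "")) &&
       xs.any (fun item => decide (1 < item.length) && pvVerbRoles.contains (item.getD 1 ""))) := by
  simp [has_valid_malayalam_patterns_py, List.any_map, List.any_filter, Function.comp]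

-- ===== VERDICT (by name: the statement is the Claim_ definition above) =====
theorem has_valid_malayalam_patterns_py_spec : Claim_equal_has_valid_malayalam_patterns_py := by
  intro xs _
  unfold Spec_has_valid_malayalam_patterns_py has_valid_malayalam_patterns_py_alt
  rw [portA_eq, pvAltGo_eq]
  simp
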